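-- pv_equiv track=rewrite | github.com/Sabadeyan/Python | Homework_26.04.2021/Home2.py | tareri_qanak
-- ===== SOURCE A (Python) =====
-- def tareri_qanak(mutqagrvatc_text,mutqagrvats_tar):
--     count=0
--     for tar in mutqagrvatc_text:
--         if tar != mutqagrvats_tar:
--             count+=1
--         else:
--             break
--     return count
-- ===== SOURCE B (Python) =====
-- def tareri_qanak(mutqagrvatc_text, mutqagrvats_tar):
--     # right-to-left fold: acc is the answer for the suffix already seen
--     # (0 at a matching char, otherwise one more than the suffix's answer);
--     # no break, no search primitive.
--     acc = 0
--     for ch in reversed(mutqagrvatc_text):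
--         acc = 0 if ch == mutqagrvats_tar else acc + 1
--     return acc
-- ===== Notes on version B (the rewrite author's own statement) =====
-- stated objective: alternative
-- what changed: Replaces the left-to-right counting loop with break by a total right-to-left fold over reversed(text) that maintains the answer for the suffix seen so far (reset to 0 at a match, else +1), with no early exit and no search primitive.
import Mathlib
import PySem

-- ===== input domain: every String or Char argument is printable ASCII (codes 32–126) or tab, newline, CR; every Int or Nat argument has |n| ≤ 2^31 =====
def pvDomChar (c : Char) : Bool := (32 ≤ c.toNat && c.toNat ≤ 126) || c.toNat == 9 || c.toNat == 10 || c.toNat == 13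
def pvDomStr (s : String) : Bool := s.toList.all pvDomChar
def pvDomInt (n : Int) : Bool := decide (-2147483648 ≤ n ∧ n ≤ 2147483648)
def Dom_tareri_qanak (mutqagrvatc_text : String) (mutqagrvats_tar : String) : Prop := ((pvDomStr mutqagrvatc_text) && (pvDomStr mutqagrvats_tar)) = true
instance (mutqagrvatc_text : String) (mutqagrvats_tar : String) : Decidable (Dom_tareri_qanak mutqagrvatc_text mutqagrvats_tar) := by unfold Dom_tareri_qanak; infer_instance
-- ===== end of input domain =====

-- B replaces A's left-to-right counting loop with break by a total right-to-left fold over the reversed text (alternative decomposition; same cost).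


-- ===== PORT A =====
-- A's loop: walk the characters left to right, counting until one equals the target; 'break' = stop.
def tareriLoopA (tar : String) : List Char → Int → Int
  | [], count => count
  | c :: rest, count =>
      if String.singleton c ≠ tar then tareriLoopA tar rest (count + 1) else count

def tareri_qanak (mutqagrvatc_text : String) (mutqagrvats_tar : String) : Int :=
  tareriLoopA mutqagrvats_tar mutqagrvatc_text.toList 0

-- ===== PORT B =====
-- B: fold over reversed(text); acc is the answer for the suffix already seen
-- (0 at a matching char, otherwise one more than the suffix's answer).
def tareri_qanak_alt (mutqagrvatc_text : String) (mutqagrvats_tar : String) : Int :=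
  mutqagrvatc_text.toList.reverse.foldl
    (fun acc c => if String.singleton c = mutqagrvats_tar then 0 else acc + 1) 0

-- ===== PRECONDITION & SPEC =====
def Spec_tareri_qanak (mutqagrvatc_text : String) (mutqagrvats_tar : String) (out : Int) : Prop := out = tareri_qanak_alt mutqagrvatc_text mutqagrvats_tar
instance (mutqagrvatc_text : String) (mutqagrvats_tar : String) (out : Int) : Decidable (Spec_tareri_qanak mutqagrvatc_text mutqagrvats_tar out) := by unfold Spec_tareri_qanak; infer_instance

-- ===== CLAIM (what is proved, stated in full; the proofs are below) =====
def Claim_equal_tareri_qanak : Prop := ∀ (mutqagrvatc_text : String) (mutqagrvats_tar : String), Dom_tareri_qanak mutqagrvatc_text mutqagrvats_tar → Spec_tareri_qanak mutqagrvatc_text mutqagrvats_tar (tareri_qanak mutqagrvatc_text mutqagrvats_tar)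

-- ===== LEMMAS AND PROOFS =====

-- B's fold over the reversed list is the foldr of the suffix recurrence.
theorem alt_eq_foldr (tar : String) (l : List Char) :
    l.reverse.foldl (fun acc c => if String.singleton c = tar then 0 else acc + 1) 0
      = l.foldr (fun c acc => if String.singleton c = tar then (0 : Int) else acc + 1) 0 := by
  rw [List.foldl_reverse]

-- A's loop equals count plus the foldr of the suffix recurrence.
theorem loopA_eq_foldr (tar : String) (l : List Char) (count : Int) :
    tareriLoopA tar l count
      = count + l.foldr (fun c acc => if String.singleton c = tar then (0 : Int) else acc + 1) 0 := by
  induction l generalizing count with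
  | nil => simp [tareriLoopA]
  | cons c rest ih =>
      by_cases hc : String.singleton c = tar
      · simp [tareriLoopA, hc]
      · simp only [tareriLoopA, if_pos hc, List.foldr_cons, if_neg hc, ih]
        ring

-- ===== VERDICT (by name: the statement is the Claim_ definition above) =====
theorem tareri_qanak_spec : Claim_equal_tareri_qanak := by
  intro text tar _
  show tareri_qanak text tar = tareri_qanak_alt text tar
  unfold tareri_qanak tareri_qanak_alt
  rw [alt_eq_foldr, loopA_eq_foldr, zero_add]
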